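-- pv_equiv track=rewrite | github.com/besthong/Algo | 프로그래머스/프로그래머스 - 전력망을 둘로 나누기.py | bfs
-- ===== SOURCE A (Python) =====
-- from collections import deque
--
-- def bfs(x,visited,graph):
--     q = deque([x])
--     visited[x] = True
--     result = 1
--
--     while q:
--         cur = q.popleft()
--
--         for i in graph[cur]:
--             if visited[i] == False:
--                 result+=1
--                 q.append(i)
--                 visited[i]=True
--
--     return result
-- ===== SOURCE B (Python) =====
-- def bfs(x, visited, graph):
--     # Recursive DFS over the graph structure; mutates visited in place like A.
--     def dfs(u):
--         visited[u] = True
--         total = 1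
--         for v in graph[u]:
--             if not visited[v]:
--                 total += dfs(v)
--         return total
--     return dfs(x)
-- ===== Notes on version B (the rewrite author's own statement) =====
-- stated objective: alternative
-- what changed: The iterative queue-based BFS (deque, mark-at-enqueue, running counter) is replaced by a recursive depth-first traversal over the graph structure that marks a node on entry and sums the component sizes returned by recursive calls on unvisited neighbours; same asymptotic cost, no queue.
-- outside the precondition, e.g. on bfs(-1, [False], [[], []]): A returns 1, B returns 1
import Mathlib
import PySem

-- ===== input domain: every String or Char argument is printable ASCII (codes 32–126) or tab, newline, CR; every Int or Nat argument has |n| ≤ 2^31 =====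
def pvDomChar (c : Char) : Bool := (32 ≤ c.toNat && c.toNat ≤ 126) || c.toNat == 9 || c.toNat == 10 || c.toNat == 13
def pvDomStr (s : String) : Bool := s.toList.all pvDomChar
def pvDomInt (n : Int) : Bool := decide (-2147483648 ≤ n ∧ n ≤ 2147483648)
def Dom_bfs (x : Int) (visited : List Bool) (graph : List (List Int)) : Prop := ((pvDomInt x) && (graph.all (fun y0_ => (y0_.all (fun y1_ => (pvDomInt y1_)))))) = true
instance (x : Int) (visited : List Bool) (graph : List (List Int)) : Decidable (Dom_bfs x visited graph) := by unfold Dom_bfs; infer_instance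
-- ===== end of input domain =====

-- B replaces A's iterative queue-based BFS (deque + mark-at-enqueue counter) by a recursive
-- depth-first traversal that marks a node on entry and sums the sizes returned by recursive
-- calls on unvisited neighbours (alternative decomposition, same asymptotic cost).
-- Both Pythons mutate `visited` in place identically; the claim proved here is about the return value.


-- ===== PORT A =====
def stepA (st : Int × List Int × List Bool) (i : Int) : Int × List Int × List Bool :=
  if PySem.List.pyGetD st.2.2 i true == false then
    (st.1 + 1, st.2.1 ++ [i], PySem.List.pySetD st.2.2 i true)
  else st

def bfsLoop (g : List (List Int)) (fuel : Nat) (q : List Int) (vis : List Bool) (result : Int) : Int :=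
  match fuel, q with
  | 0, _ => result
  | _ + 1, [] => result
  | fuel + 1, cur :: q' =>
    let st := (PySem.List.pyGetD g cur []).foldl stepA (result, q', vis)
    bfsLoop g fuel st.2.1 st.2.2 st.1

def bfs (x : Int) (visited : List Bool) (graph : List (List Int)) : Int :=
  bfsLoop graph (visited.length + 1) [x] (PySem.List.pySetD visited x true) 1

-- ===== PORT B =====
mutual
def dfsGo (g : List (List Int)) (fuel : Nat) (u : Int) (vis : List Bool) : Int × List Bool :=
  match fuel with
  | 0 => (1, PySem.List.pySetD vis u true)
  | fuel + 1 => dfsRow g fuel (PySem.List.pyGetD g u []) (1, PySem.List.pySetD vis u true)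
  termination_by (fuel, 0)

def dfsRow (g : List (List Int)) (fuel : Nat) (row : List Int) (st : Int × List Bool) : Int × List Bool :=
  match row with
  | [] => st
  | v :: row' =>
    if PySem.List.pyGetD st.2 v true == false then
      let r := dfsGo g fuel v st.2
      dfsRow g fuel row' (st.1 + r.1, r.2)
    else dfsRow g fuel row' st
  termination_by (fuel, row.length + 1)
end

def bfs_alt (x : Int) (visited : List Bool) (graph : List (List Int)) : Int :=
  (dfsGo graph (visited.length + 1) x visited).1

-- ===== PRECONDITION & SPEC =====
-- ===== precondition vocabulary =====
-- canonical position of (possibly negative, Python-style) index i in a list of length L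
def cell (L : Nat) (i : Int) : Nat := ((i + L).toNat) % L
-- i is an in-range Python index for a list of length L (possibly negative)
abbrev InRg (L : Nat) (i : Int) : Prop := -(L : Int) ≤ i ∧ i < (L : Int)
-- i denotes the same cell in `visited` (length lv) and in `graph` (length lg)
abbrev Ok (lv lg : Nat) (i : Int) : Prop :=
  (0 ≤ i ∧ i < (lv : Int) ∧ i < (lg : Int)) ∨ (lv = lg ∧ InRg lv i)
-- read of the visited array at a canonical position; out of range reads true
abbrev rd (vis : List Bool) (k : Nat) : Bool := vis.getD k true
-- every entry of an adjacency row can be read in visited, and entries leading to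
-- unvisited cells are consistent indices of both arrays
abbrev RowOk (n lg : Nat) (vis1 : List Bool) (row : List Int) : Prop :=
  ∀ j ∈ row, InRg n j ∧ (rd vis1 (cell n j) = false → Ok n lg j)
-- computed reachable-cell marking for Pre_: saturate neighbour expansion n times
def markInner (n lg : Nat) (vis1 : List Bool) (a : List Bool) (j : Int) : List Bool :=
  if decide (Ok n lg j) && !(vis1.getD (cell n j) true) then a.set (cell n j) true else a
def markOuter (n lg : Nat) (g : List (List Int)) (vis1 : List Bool) (acc : List Bool) (p : Nat) : List Bool :=
  if acc.getD p false then (g.getD p []).foldl (markInner n lg vis1) acc else acc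
def markStep (n lg : Nat) (g : List (List Int)) (vis1 : List Bool) (m : List Bool) : List Bool :=
  (List.range n).foldl (markOuter n lg g vis1) m
def marks (n lg : Nat) (g : List (List Int)) (vis1 : List Bool) (c0 : Nat) : List Bool :=
  (markStep n lg g vis1)^[n] ((List.replicate n false).set c0 true)

-- Pre_: x is a consistent index and every adjacency row of a cell reachable from x
-- through unvisited cells is readable/consistent (exactly the inputs where A's
-- traversal never raises and wraparound never aliases two labels of one cell).
def Pre_bfs (x : Int) (visited : List Bool) (graph : List (List Int)) : Prop :=
  Ok visited.length graph.length x ∧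
  ∀ p ∈ List.range visited.length,
    (marks visited.length graph.length graph (visited.set (cell visited.length x) true)
      (cell visited.length x)).getD p false = true →
    RowOk visited.length graph.length (visited.set (cell visited.length x) true) (graph.getD p [])

instance (x : Int) (visited : List Bool) (graph : List (List Int)) : Decidable (Pre_bfs x visited graph) := by
  unfold Pre_bfs; infer_instance

def pvWitness_bfs : Int × List Bool × List (List Int) := (0, [false, false, true], [[1], [0, 2], []])

def Spec_bfs (x : Int) (visited : List Bool) (graph : List (List Int)) (out : Int) : Prop := out = bfs_alt x visited graph
instance (x : Int) (visited : List Bool) (graph : List (List Int)) (out : Int) : Decidable (Spec_bfs x visited graph out) := by unfold Spec_bfs; infer_instance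

-- ===== CLAIM (what is proved, stated in full; the proofs are below) =====
def Claim_equal_bfs : Prop := ∀ (x : Int) (visited : List Bool) (graph : List (List Int)), Dom_bfs x visited graph → Pre_bfs x visited graph → Spec_bfs x visited graph (bfs x visited graph)

-- ===== LEMMAS AND PROOFS =====


-- ===== canonical-index lemmas =====
lemma cell_nonneg {L : Nat} {i : Int} (h0 : 0 ≤ i) (h1 : i < (L : Int)) : cell L i = i.toNat := by
  unfold cell
  have : (i + L).toNat = i.toNat + L := by omega
  rw [this, Nat.add_mod_right, Nat.mod_eq_of_lt (by omega)]

lemma pyIdx_cell {L : Nat} {i : Int} (h : InRg L i) :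
    PySem.List.pyIdx? L i = some (cell L i) := by
  obtain ⟨h1, h2⟩ := h
  unfold PySem.List.pyIdx?
  by_cases h0 : 0 ≤ i
  · rw [if_pos h0, if_pos h2, cell_nonneg h0 h2]
  · rw [if_neg h0, if_pos h1]
    congr 1
    unfold cell
    have : (i + L).toNat < L := by omega
    rw [Nat.mod_eq_of_lt this]
    omega

lemma pyGetD_cell {α : Type} (xs : List α) (d : α) {i : Int} (h : InRg xs.length i) :
    PySem.List.pyGetD xs i d = xs.getD (cell xs.length i) d := by
  unfold PySem.List.pyGetD PySem.List.pyGet?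
  rw [pyIdx_cell h]
  simp [List.getD]

lemma pySetD_cell {α : Type} (xs : List α) (v : α) {i : Int} (h : InRg xs.length i) :
    PySem.List.pySetD xs i v = xs.set (cell xs.length i) v := by
  unfold PySem.List.pySetD PySem.List.pySet?
  rw [pyIdx_cell h]
  rfl

lemma cell_lt {L : Nat} (h : 0 < L) (i : Int) : cell L i < L := Nat.mod_lt _ h

lemma ok_inrV {lv lg : Nat} {i : Int} (h : Ok lv lg i) : InRg lv i := by
  rcases h with ⟨h0, h1, h2⟩ | ⟨he, h1, h2⟩ <;> exact ⟨by omega, by omega⟩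

lemma ok_inrG {lv lg : Nat} {i : Int} (h : Ok lv lg i) : InRg lg i := by
  rcases h with ⟨h0, h1, h2⟩ | ⟨he, h1, h2⟩ <;> subst_eqs <;> constructor <;> omega

lemma ok_cell_eq {lv lg : Nat} {i : Int} (h : Ok lv lg i) : cell lv i = cell lg i := by
  rcases h with ⟨h0, h1, h2⟩ | ⟨he, _⟩
  · rw [cell_nonneg h0 h1, cell_nonneg h0 h2]
  · rw [he]

lemma ok_pos {lv lg : Nat} {i : Int} (h : Ok lv lg i) : 0 < lv := by
  rcases h with ⟨h0, h1, h2⟩ | ⟨he, h1, h2⟩ <;> omega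

-- ===== visited-array lemmas =====
def cfB (vis : List Bool) : Nat := vis.count false
def Mono (a b : List Bool) : Prop := ∀ k : Nat, rd a k = true → rd b k = true

lemma mono_trans {a b c : List Bool} (h1 : Mono a b) (h2 : Mono b c) : Mono a c :=
  fun k hk => h2 k (h1 k hk)

lemma rd_set (vis : List Bool) (k m : Nat) (h : k < vis.length) :
    rd (vis.set k true) m = if m = k then true else rd vis m := by
  unfold rd
  by_cases hmk : m = k
  · simp [hmk, List.getD, List.getElem?_set, h]
  · have : k ≠ m := fun h' => hmk h'.symm
    simp [List.getD, List.getElem?_set, hmk, this]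

lemma mono_set (vis : List Bool) (k : Nat) : Mono vis (vis.set k true) := by
  intro m hm
  by_cases h : k < vis.length
  · rw [rd_set vis k m h]; split
    · rfl
    · simpa [rd, List.getD] using hm
  · rw [List.set_eq_of_length_le (by omega)]; exact hm

lemma cf_mark (vis : List Bool) (k : Nat) (h : k < vis.length) (hf : rd vis k = false) :
    cfB (vis.set k true) + 1 = cfB vis := by
  induction vis generalizing k with
  | nil => simp at h
  | cons a t ih =>
    cases k with
    | zero => simp [rd, List.getD] at hf; simp [cfB, hf, List.count_cons]
    | succ k =>
      simp at h
      have := ih k h (by simpa [rd, List.getD] using hf)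
      simp [cfB, List.count_cons] at this ⊢
      omega

lemma cf_set_le (vis : List Bool) (k : Nat) : cfB (vis.set k true) ≤ cfB vis := by
  by_cases h : k < vis.length
  · rcases hb : rd vis k with _ | _
    · have := cf_mark vis k h hb; omega
    · have : vis.set k true = vis := by
        have : vis[k] = true := by simpa [rd, List.getD, List.getElem?_eq_getElem h] using hb
        rw [← this]; exact List.set_getElem_self ..
      rw [this]
  · rw [List.set_eq_of_length_le (by omega)]

lemma cf_le_len (vis : List Bool) : cfB vis ≤ vis.length := List.count_le_length

lemma cf_antitone (a b : List Bool) (hlen : a.length = b.length) (hm : Mono a b) :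
    cfB b ≤ cfB a := by
  induction a generalizing b with
  | nil => cases b <;> simp_all [cfB]
  | cons x a' ih =>
    cases b with
    | nil => simp at hlen
    | cons y b' =>
      have h0 := hm 0
      have h' : Mono a' b' := fun k hk => by
        have := hm (k + 1)
        simpa [rd, List.getD] using this (by simpa [rd, List.getD] using hk)
      have := ih b' (by simpa using hlen) h'
      simp [rd, List.getD] at h0
      cases x with
      | true =>
        rw [h0 rfl]
        simpa [cfB] using this
      | false =>
        cases y <;> simp [cfB, List.count_cons] <;> unfold cfB at this <;> omega

-- ===== reachability =====
inductive Rch (n : Nat) (g : List (List Int)) (vis : List Bool) : Nat → Nat → Prop where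
  | refl (u : Nat) : Rch n g vis u u
  | tail {u v : Nat} {w : Int} : Rch n g vis u v → w ∈ g.getD v [] → Ok n g.length w →
      rd vis (cell n w) = false → Rch n g vis u (cell n w)

def reachF (n : Nat) (g : List (List Int)) (vis : List Bool) (c0 p : Nat) : Prop :=
  p = c0 ∨ Rch n g vis c0 p

lemma Rch_trans {n g vis} {a b c : Nat} (h1 : Rch n g vis a b) (h2 : Rch n g vis b c) :
    Rch n g vis a c := by
  induction h2 with
  | refl => exact h1
  | tail _ hm ho hf ih => exact Rch.tail ih hm ho hf

lemma Rch_mono {n : Nat} {g : List (List Int)} {vis vis' : List Bool} (hm : Mono vis vis')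
    {u k : Nat} (h : Rch n g vis' u k) : Rch n g vis u k := by
  induction h with
  | refl => exact Rch.refl u
  | tail _ hmem ho hf ih =>
    refine Rch.tail ih hmem ho ?_
    rcases hb : rd vis _ with _ | _
    · rfl
    · rw [hm _ hb] at hf; cases hf

lemma Rch_src {n g vis} {u k : Nat} (h : Rch n g vis u k) : k = u ∨ rd vis k = false := by
  induction h with
  | refl => exact Or.inl rfl
  | tail _ _ _ hf _ => exact Or.inr hf

lemma Rch_lt {n : Nat} {g : List (List Int)} {vis : List Bool} {u k : Nat}
    (hu : u < n) (h : Rch n g vis u k) : k < n := by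
  induction h with
  | refl => exact hu
  | tail _ _ _ _ _ => exact cell_lt (by omega) _

lemma reach_step {n : Nat} {g : List (List Int)} {vis : List Bool} {c0 p : Nat} {z : Int}
    (hp : reachF n g vis c0 p) (hz : z ∈ g.getD p []) (ho : Ok n g.length z)
    (hf : rd vis (cell n z) = false) : reachF n g vis c0 (cell n z) := by
  rcases hp with h | h
  · subst h; exact Or.inr (Rch.tail (Rch.refl _) hz ho hf)
  · exact Or.inr (Rch.tail h hz ho hf)

lemma reachF_lt {n g vis} {c0 p : Nat} (hc0 : c0 < n) (h : reachF n g vis c0 p) : p < n := by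
  rcases h with h | h
  · omega
  · exact Rch_lt hc0 h

lemma Rch01 {n : Nat} {g : List (List Int)} {vis : List Bool} {x k : Nat}
    (hx : x < vis.length) (h : Rch n g vis x k) :
    rd (vis.set x true) k = true ∨ Rch n g (vis.set x true) x k := by
  induction h with
  | refl => exact Or.inr (Rch.refl x)
  | @tail v w hr hmem ho hf ih =>
    rcases hb : rd (vis.set x true) (cell n w) with _ | _
    · have hv1 : Rch n g (vis.set x true) x v := by
        rcases ih with hv | hv
        · rw [rd_set vis x v hx] at hv
          split at hv
          · subst v; exact Rch.refl _
          · rcases Rch_src hr with h1 | h1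
            · rw [h1]; exact Rch.refl x
            · rw [h1] at hv; cases hv
        · exact hv
      exact Or.inr (Rch.tail hv1 hmem ho hb)
    · exact Or.inl rfl

lemma pin {n : Nat} {g : List (List Int)}
    (x : Nat) (hx : x < n) (vis1 vis' : List Bool)
    (hmono : Mono vis1 vis') (hxm : rd vis' x = true)
    (hsound : ∀ k : Nat, k < n → rd vis' k = true → rd vis1 k = true ∨ Rch n g vis1 x k)
    (hclosed : ∀ w : Nat, w < n → (w = x ∨ (rd vis1 w = false ∧ rd vis' w = true)) →
        ∀ v ∈ g.getD w [], rd vis' (cell n v) = true) :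
    ∀ k : Nat, k < n → (rd vis' k = true ↔ (rd vis1 k = true ∨ Rch n g vis1 x k)) := by
  intro k hk
  constructor
  · exact hsound k hk
  · rintro (h | h)
    · exact hmono k h
    · induction h with
      | refl => exact hxm
      | @tail v w hr hmem ho hf ih =>
        have hvlt : v < n := Rch_lt hx hr
        have hv' : rd vis' v = true := by
          rcases Rch_src hr with h1 | h1
          · exact h1 ▸ hxm
          · exact ih (Rch_lt hx hr)
        have : ∀ z ∈ g.getD v [], rd vis' (cell n z) = true := by
          apply hclosed v hvlt
          rcases Rch_src hr with h1 | h1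
          · exact Or.inl h1
          · exact Or.inr ⟨h1, hv'⟩
        exact this w hmem

-- ===== closure lemmas for the Pre_ marking =====
def MonoM (a b : List Bool) : Prop := ∀ p : Nat, a.getD p false = true → b.getD p false = true

lemma monoM_trans {a b c : List Bool} (h1 : MonoM a b) (h2 : MonoM b c) : MonoM a c :=
  fun p hp => h2 p (h1 p hp)

lemma rdm_set (m : List Bool) (k p : Nat) (h : k < m.length) :
    (m.set k true).getD p false = if p = k then true else m.getD p false := by
  by_cases hpk : p = k
  · simp [hpk, List.getD, List.getElem?_set, h]
  · have : k ≠ p := fun h' => hpk h'.symm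
    simp [List.getD, List.getElem?_set, hpk, this]

lemma monoM_set (m : List Bool) (k : Nat) : MonoM m (m.set k true) := by
  intro p hp
  by_cases h : k < m.length
  · rw [rdm_set m k p h]; split
    · rfl
    · exact hp
  · rw [List.set_eq_of_length_le (by omega)]; exact hp

lemma getD_true_lt {m : List Bool} {p : Nat} (h : m.getD p false = true) : p < m.length := by
  by_contra hc
  rw [List.getD_eq_default _ _ (by omega)] at h
  cases h

lemma markInner_mono (n lg : Nat) (vis1 a : List Bool) (j : Int) :
    MonoM a (markInner n lg vis1 a j) := by
  unfold markInner
  split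
  · exact monoM_set a _
  · exact fun p hp => hp

lemma markInner_len (n lg : Nat) (vis1 a : List Bool) (j : Int) :
    (markInner n lg vis1 a j).length = a.length := by
  unfold markInner; split <;> simp

lemma foldl_markInner_mono (n lg : Nat) (vis1 : List Bool) (row : List Int) :
    ∀ a : List Bool, MonoM a (row.foldl (markInner n lg vis1) a) := by
  induction row with
  | nil => exact fun a p hp => hp
  | cons j row' ih =>
    intro a
    exact monoM_trans (markInner_mono n lg vis1 a j) (ih _)

lemma foldl_markInner_len (n lg : Nat) (vis1 : List Bool) (row : List Int) :
    ∀ a : List Bool, (row.foldl (markInner n lg vis1) a).length = a.length := by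
  induction row with
  | nil => exact fun a => rfl
  | cons j row' ih =>
    intro a
    rw [List.foldl_cons, ih, markInner_len]

lemma markOuter_mono (n lg : Nat) (g : List (List Int)) (vis1 acc : List Bool) (p : Nat) :
    MonoM acc (markOuter n lg g vis1 acc p) := by
  unfold markOuter
  split
  · exact foldl_markInner_mono n lg vis1 (g.getD p []) acc
  · exact fun q hq => hq

lemma markOuter_len (n lg : Nat) (g : List (List Int)) (vis1 acc : List Bool) (p : Nat) :
    (markOuter n lg g vis1 acc p).length = acc.length := by
  unfold markOuter; split
  · exact foldl_markInner_len ..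
  · rfl

lemma foldl_markOuter_mono (n lg : Nat) (g : List (List Int)) (vis1 : List Bool) (l : List Nat) :
    ∀ acc : List Bool, MonoM acc (l.foldl (markOuter n lg g vis1) acc) := by
  induction l with
  | nil => exact fun acc p hp => hp
  | cons a l' ih =>
    intro acc
    exact monoM_trans (markOuter_mono n lg g vis1 acc a) (ih _)

lemma foldl_markOuter_len (n lg : Nat) (g : List (List Int)) (vis1 : List Bool) (l : List Nat) :
    ∀ acc : List Bool, (l.foldl (markOuter n lg g vis1) acc).length = acc.length := by
  induction l with
  | nil => exact fun acc => rfl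
  | cons a l' ih =>
    intro acc
    rw [List.foldl_cons, ih, markOuter_len]

lemma markStep_mono (n lg : Nat) (g : List (List Int)) (vis1 m : List Bool) :
    MonoM m (markStep n lg g vis1 m) := foldl_markOuter_mono n lg g vis1 (List.range n) m

lemma markStep_len (n lg : Nat) (g : List (List Int)) (vis1 m : List Bool) :
    (markStep n lg g vis1 m).length = m.length := foldl_markOuter_len ..

lemma markInner_mem (n lg : Nat) (vis1 : List Bool) {j : Int} (ho : Ok n lg j)
    (hv : vis1.getD (cell n j) true = false) (row : List Int) :
    ∀ a : List Bool, a.length = n → j ∈ row →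
    (row.foldl (markInner n lg vis1) a).getD (cell n j) false = true := by
  induction row with
  | nil => intro a _ h; cases h
  | cons j' row' ih =>
    intro a hlen hmem
    rw [List.foldl_cons]
    rcases List.mem_cons.mp hmem with h | h
    · subst h
      have hstep : markInner n lg vis1 a j = a.set (cell n j) true := by
        unfold markInner
        rw [if_pos (by rw [hv]; simp [ho])]
      apply foldl_markInner_mono
      rw [hstep, rdm_set _ _ _ (by have := cell_lt (ok_pos ho) j; omega)]
      simp
    · exact ih _ (by rw [markInner_len]; exact hlen) h

lemma markStep_closed (n lg : Nat) (g : List (List Int)) (vis1 : List Bool)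
    {m : List Bool} {p : Nat} {j : Int}
    (hlen : m.length = n) (hp : m.getD p false = true) (hj : j ∈ g.getD p [])
    (ho : Ok n lg j) (hv : vis1.getD (cell n j) true = false) :
    (markStep n lg g vis1 m).getD (cell n j) false = true := by
  have hpn : p < n := by have := getD_true_lt hp; omega
  have hmem : p ∈ List.range n := List.mem_range.mpr hpn
  unfold markStep
  -- generic: fold over any list containing p
  suffices h : ∀ (l : List Nat) (acc : List Bool), acc.length = n → p ∈ l →
      acc.getD p false = true → (l.foldl (markOuter n lg g vis1) acc).getD (cell n j) false = true by
    exact h (List.range n) m hlen hmem hp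
  intro l
  induction l with
  | nil => intro acc _ h; cases h
  | cons a l' ih =>
    intro acc hlenacc hmeml hacc
    rw [List.foldl_cons]
    rcases List.mem_cons.mp hmeml with h | h
    · subst h
      have hout : markOuter n lg g vis1 acc p = (g.getD p []).foldl (markInner n lg vis1) acc := by
        unfold markOuter; rw [if_pos hacc]
      apply foldl_markOuter_mono
      rw [hout]
      exact markInner_mem n lg vis1 ho hv _ acc hlenacc hj
    · exact ih _ (by rw [markOuter_len]; exact hlenacc) h
        (markOuter_mono n lg g vis1 acc a p hacc)

lemma countT_mono (a b : List Bool) (hlen : a.length = b.length) (hm : MonoM a b) :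
    a.count true ≤ b.count true := by
  induction a generalizing b with
  | nil => simp
  | cons x a' ih =>
    cases b with
    | nil => simp at hlen
    | cons y b' =>
      have h0 := hm 0
      simp [List.getD] at h0
      have h' : MonoM a' b' := fun k hk => by
        have := hm (k + 1)
        simpa [List.getD] using this (by simpa [List.getD] using hk)
      have := ih b' (by simpa using hlen) h'
      cases x with
      | true => rw [h0 rfl]; simp [List.count_cons]; omega
      | false => cases y <;> simp [List.count_cons] <;> omega

lemma monoM_eq_of_count (a b : List Bool) (hlen : a.length = b.length) (hm : MonoM a b)
    (hc : b.count true ≤ a.count true) : a = b := by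
  induction a generalizing b with
  | nil => cases b <;> simp_all
  | cons x a' ih =>
    cases b with
    | nil => simp at hlen
    | cons y b' =>
      have h0 := hm 0
      simp [List.getD] at h0
      have h' : MonoM a' b' := fun k hk => by
        have := hm (k + 1)
        simpa [List.getD] using this (by simpa [List.getD] using hk)
      have hcnt := countT_mono a' b' (by simpa using hlen) h'
      cases x with
      | true =>
        rw [h0 rfl] at hc ⊢
        simp [List.count_cons] at hc
        rw [ih b' (by simpa using hlen) h' (by omega)]
      | false =>
        cases y with
        | true => simp [List.count_cons] at hc; omega
        | false => rw [ih b' (by simpa using hlen) h' (by simpa [List.count_cons] using hc)]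

lemma markStep_progress (n lg : Nat) (g : List (List Int)) (vis1 m : List Bool) :
    markStep n lg g vis1 m = m ∨ m.count true < (markStep n lg g vis1 m).count true := by
  by_cases h : markStep n lg g vis1 m = m
  · exact Or.inl h
  · right
    by_contra hc
    push_neg at hc
    exact h (monoM_eq_of_count m _ (markStep_len n lg g vis1 m).symm (markStep_mono n lg g vis1 m) hc).symm

lemma iterate_markStep_len (n lg : Nat) (g : List (List Int)) (vis1 : List Bool) (k : Nat)
    (m : List Bool) : ((markStep n lg g vis1)^[k] m).length = m.length := by
  induction k generalizing m with
  | zero => rfl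
  | succ k ih => rw [Function.iterate_succ_apply, ih, markStep_len]

lemma iterate_markStep_mono (n lg : Nat) (g : List (List Int)) (vis1 : List Bool) (k : Nat)
    (m : List Bool) : MonoM m ((markStep n lg g vis1)^[k] m) := by
  induction k generalizing m with
  | zero => exact fun p hp => hp
  | succ k ih =>
    rw [Function.iterate_succ_apply]
    exact monoM_trans (markStep_mono n lg g vis1 m) (ih _)

lemma iterate_fix_or_count (n lg : Nat) (g : List (List Int)) (vis1 : List Bool) :
    ∀ (k : Nat) (m : List Bool),
      markStep n lg g vis1 ((markStep n lg g vis1)^[k] m) = (markStep n lg g vis1)^[k] m ∨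
      k + m.count true ≤ ((markStep n lg g vis1)^[k] m).count true := by
  intro k
  induction k with
  | zero => intro m; exact Or.inr (by simp)
  | succ k ih =>
    intro m
    rcases ih m with h | h
    · have e : (markStep n lg g vis1)^[k + 1] m = (markStep n lg g vis1)^[k] m := by
        rw [Function.iterate_succ_apply', h]
      left
      rw [e]
      exact h
    · rcases markStep_progress n lg g vis1 ((markStep n lg g vis1)^[k] m) with h2 | h2
      · have e : (markStep n lg g vis1)^[k + 1] m = (markStep n lg g vis1)^[k] m := by
          rw [Function.iterate_succ_apply']
          exact h2
        left
        rw [e]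
        exact h2
      · right
        rw [Function.iterate_succ_apply']
        omega

lemma marks_fix (n lg : Nat) (g : List (List Int)) (vis1 : List Bool) (c0 : Nat) (hc0 : c0 < n) :
    markStep n lg g vis1 (marks n lg g vis1 c0) = marks n lg g vis1 c0 := by
  have hinitlen : ((List.replicate n false).set c0 true).length = n := by simp
  have hlt : c0 < ((List.replicate n false).set c0 true).length := by simpa using hc0
  have hinitc : ((List.replicate n false).set c0 true).getD c0 false = true := by
    rw [rdm_set _ _ _ (by simpa using hc0 : c0 < (List.replicate n false).length)]; simp
  have hcell : ((List.replicate n false).set c0 true)[c0] = true := by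
    have h' := hinitc
    rwa [List.getD_eq_getElem _ _ hlt] at h'
  have hinitcnt : 1 ≤ ((List.replicate n false).set c0 true).count true := by
    have hmem : true ∈ (List.replicate n false).set c0 true :=
      List.mem_iff_getElem.mpr ⟨c0, hlt, hcell⟩
    exact List.count_pos_iff.mpr hmem
  rcases iterate_fix_or_count n lg g vis1 n ((List.replicate n false).set c0 true) with h | h
  · exact h
  · exfalso
    have hle : ((markStep n lg g vis1)^[n] ((List.replicate n false).set c0 true)).count true ≤ n := by
      have := List.count_le_length
        (l := (markStep n lg g vis1)^[n] ((List.replicate n false).set c0 true)) (a := true)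
      rw [iterate_markStep_len, hinitlen] at this
      exact this
    omega

lemma marks_init_marked (n lg : Nat) (g : List (List Int)) (vis1 : List Bool) (c0 : Nat)
    (hc0 : c0 < n) : (marks n lg g vis1 c0).getD c0 false = true := by
  apply iterate_markStep_mono
  rw [rdm_set _ _ _ (by simpa using hc0 : c0 < (List.replicate n false).length)]; simp

lemma marks_len (n lg : Nat) (g : List (List Int)) (vis1 : List Bool) (c0 : Nat) :
    (marks n lg g vis1 c0).length = n := by
  unfold marks
  rw [iterate_markStep_len]
  simp

lemma marks_complete (n : Nat) (g : List (List Int)) (vis1 : List Bool) (c0 : Nat)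
    (hc0 : c0 < n) {p : Nat} (h : reachF n g vis1 c0 p) :
    (marks n g.length g vis1 c0).getD p false = true := by
  rcases h with h | h
  · rw [h]; exact marks_init_marked n g.length g vis1 c0 hc0
  · induction h with
    | refl => exact marks_init_marked n g.length g vis1 c0 hc0
    | @tail v w hr hmem ho hf ih =>
      have hv : (marks n g.length g vis1 c0).getD v false = true := ih
      rw [← marks_fix n g.length g vis1 c0 hc0]
      exact markStep_closed n g.length g vis1 (marks_len n g.length g vis1 c0) hv hmem ho hf

-- ===== A-side: the inner for-loop =====
lemma foldA_spec (n : Nat) (g : List (List Int)) (vis1 : List Bool) (row : List Int)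
    (hrow : RowOk n g.length vis1 row) (hn0 : 0 < n) :
    ∀ st : Int × List Int × List Bool, st.2.2.length = n → Mono vis1 st.2.2 →
    ((row.foldl stepA st).2.2.length = n ∧
     (row.foldl stepA st).1 + ((cfB (row.foldl stepA st).2.2 : Int)) = st.1 + (cfB st.2.2 : Int) ∧
     Mono st.2.2 (row.foldl stepA st).2.2 ∧
     (∀ k : Nat, k < n → rd (row.foldl stepA st).2.2 k = true →
        rd st.2.2 k = true ∨ ∃ j ∈ row, cell n j = k ∧ rd st.2.2 k = false) ∧
     (∀ j ∈ (row.foldl stepA st).2.1, j ∈ st.2.1 ∨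
        (j ∈ row ∧ Ok n g.length j ∧ rd st.2.2 (cell n j) = false ∧
         rd (row.foldl stepA st).2.2 (cell n j) = true)) ∧
     (∀ j ∈ st.2.1, j ∈ (row.foldl stepA st).2.1) ∧
     (∀ w ∈ row, rd (row.foldl stepA st).2.2 (cell n w) = true) ∧
     (∀ k : Nat, k < n → rd st.2.2 k = false → rd (row.foldl stepA st).2.2 k = true →
        ∃ j ∈ (row.foldl stepA st).2.1, cell n j = k) ∧
     (row.foldl stepA st).2.1.length + cfB (row.foldl stepA st).2.2 ≤ st.2.1.length + cfB st.2.2) := by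
  induction row with
  | nil =>
    intro st hlen _
    simp only [List.foldl_nil]
    refine ⟨hlen, by simp, fun k hk => hk, fun k _ hk => Or.inl hk, fun j hj => Or.inl hj,
      fun j hj => hj, by simp, ?_, le_refl _⟩
    intro k _ hf ht; rw [hf] at ht; cases ht
  | cons i row' ih =>
    intro st hlen hm1
    obtain ⟨hInR, hOkIf⟩ := hrow i List.mem_cons_self
    have hrow' : RowOk n g.length vis1 row' := fun j hj => hrow j (List.mem_cons_of_mem _ hj)
    have hread : PySem.List.pyGetD st.2.2 i true = rd st.2.2 (cell n i) := by
      rw [pyGetD_cell st.2.2 true (by rw [hlen]; exact hInR), hlen]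
    have hcilt : cell n i < n := cell_lt hn0 i
    have hcilen : cell n i < st.2.2.length := by omega
    simp only [List.foldl_cons]
    by_cases hc : rd st.2.2 (cell n i) = false
    · have hv1f : rd vis1 (cell n i) = false := by
        rcases hb : rd vis1 (cell n i) with _ | _
        · rfl
        · rw [hm1 _ hb] at hc; cases hc
      have hOk : Ok n g.length i := hOkIf hv1f
      have hstep : stepA st i = (st.1 + 1, st.2.1 ++ [i], st.2.2.set (cell n i) true) := by
        simp only [stepA, hread, hc]
        rw [pySetD_cell st.2.2 true (by rw [hlen]; exact hInR), hlen]
        rfl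
      rw [hstep]
      set st' : Int × List Int × List Bool := (st.1 + 1, st.2.1 ++ [i], st.2.2.set (cell n i) true) with hst'
      have hlen' : st'.2.2.length = n := by simp [hst', hlen]
      have hms : Mono st.2.2 st'.2.2 := mono_set _ _
      obtain ⟨L, C, M, S, Q, Qs, W, E, Me⟩ := ih hrow' st' hlen' (mono_trans hm1 hms)
      have hcm : cfB (st.2.2.set (cell n i) true) + 1 = cfB st.2.2 := cf_mark _ _ hcilen hc
      have hcm' : cfB st'.2.2 + 1 = cfB st.2.2 := hcm
      have hrdset : ∀ m : Nat, rd st'.2.2 m = if m = cell n i then true else rd st.2.2 m :=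
        fun m => rd_set _ _ _ hcilen
      have hmark : rd st'.2.2 (cell n i) = true := by rw [hrdset]; simp
      refine ⟨L, ?_, mono_trans hms M, ?_, ?_, ?_, ?_, ?_, ?_⟩
      · have : st'.1 = st.1 + 1 := rfl
        omega
      · intro k hk hkt
        rcases S k hk hkt with h | ⟨j, hjr, hjc, hkf⟩
        · rw [hrdset k] at h
          split at h
          · subst k
            exact Or.inr ⟨i, List.mem_cons_self, rfl, hc⟩
          · exact Or.inl h
        · refine Or.inr ⟨j, List.mem_cons_of_mem _ hjr, hjc, ?_⟩
          rcases hb : rd st.2.2 k with _ | _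
          · rfl
          · rw [hms k hb] at hkf; cases hkf
      · intro j hj
        rcases Q j hj with h | ⟨hjr, hjo, hjf, hjt⟩
        · rcases List.mem_append.mp h with h | h
          · exact Or.inl h
          · have hji : j = i := by simpa using h
            subst hji
            exact Or.inr ⟨List.mem_cons_self, hOk, hc, M _ hmark⟩
        · refine Or.inr ⟨List.mem_cons_of_mem _ hjr, hjo, ?_, hjt⟩
          rcases hb : rd st.2.2 (cell n j) with _ | _
          · rfl
          · rw [hms _ hb] at hjf; cases hjf
      · intro j hj
        exact Qs j (List.mem_append.mpr (Or.inl hj))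
      · intro w hw
        rcases List.mem_cons.mp hw with h | h
        · subst h; exact M _ hmark
        · exact W w h
      · intro k hk hkf hkt
        by_cases hk' : rd st'.2.2 k = true
        · rw [hrdset k] at hk'
          split at hk'
          · subst k
            exact ⟨i, Qs i (List.mem_append.mpr (Or.inr List.mem_cons_self)), rfl⟩
          · rw [hkf] at hk'; cases hk'
        · exact E k hk (by rcases hb : rd st'.2.2 k with _ | _; rfl; exact absurd hb hk') hkt
      · have : st'.2.1.length = st.2.1.length + 1 := by simp [hst']
        omega
    · have hc' : rd st.2.2 (cell n i) = true := by
        rcases hb : rd st.2.2 (cell n i) with _ | _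
        · exact absurd hb hc
        · rfl
      have hstep : stepA st i = st := by
        unfold stepA
        rw [hread, hc']
        simp
      rw [hstep]
      obtain ⟨L, C, M, S, Q, Qs, W, E, Me⟩ := ih hrow' st hlen hm1
      refine ⟨L, C, M, ?_, ?_, Qs, ?_, E, Me⟩
      · intro k hk hkt
        rcases S k hk hkt with h | ⟨j, hjr, hjc, hkf⟩
        · exact Or.inl h
        · exact Or.inr ⟨j, List.mem_cons_of_mem _ hjr, hjc, hkf⟩
      · intro j hj
        rcases Q j hj with h | ⟨hjr, hjo, hjf, hjt⟩
        · exact Or.inl h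
        · exact Or.inr ⟨List.mem_cons_of_mem _ hjr, hjo, hjf, hjt⟩
      · intro w hw
        rcases List.mem_cons.mp hw with h | h
        · subst h; exact M _ hc'
        · exact W w h

-- ===== A-side: the while-loop =====
def bfsLoopV (g : List (List Int)) (fuel : Nat) (q : List Int) (vis : List Bool) (result : Int) :
    Int × List Bool :=
  match fuel, q with
  | 0, _ => (result, vis)
  | _ + 1, [] => (result, vis)
  | fuel + 1, cur :: q' =>
    let st := (PySem.List.pyGetD g cur []).foldl stepA (result, q', vis)
    bfsLoopV g fuel st.2.1 st.2.2 st.1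

lemma bfsLoop_eq_V (g : List (List Int)) (fuel : Nat) (q : List Int) (vis : List Bool) (result : Int) :
    bfsLoop g fuel q vis result = (bfsLoopV g fuel q vis result).1 := by
  induction fuel generalizing q vis result with
  | zero => rfl
  | succ fuel ih =>
    match q with
    | [] => rfl
    | cur :: q' => exact ih ..

lemma bfsV_spec (g : List (List Int)) (n : Nat) (hn0 : 0 < n) (vis1 : List Bool) (c0 : Nat)
    (hc0 : c0 < n)
    (hR : ∀ p : Nat, reachF n g vis1 c0 p → RowOk n g.length vis1 (g.getD p [])) :
    ∀ (fuel : Nat) (q : List Int) (vis : List Bool) (result : Int),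
    vis.length = n → Mono vis1 vis →
    (∀ i ∈ q, Ok n g.length i ∧ rd vis (cell n i) = true ∧ reachF n g vis1 c0 (cell n i)) →
    q.length + cfB vis ≤ fuel →
    ((bfsLoopV g fuel q vis result).2.length = n ∧
     (bfsLoopV g fuel q vis result).1 + ((cfB (bfsLoopV g fuel q vis result).2 : Int)) = result + (cfB vis : Int) ∧
     Mono vis (bfsLoopV g fuel q vis result).2 ∧
     (∀ k : Nat, k < n → rd (bfsLoopV g fuel q vis result).2 k = true →
        rd vis k = true ∨ ∃ i ∈ q, Rch n g vis (cell n i) k) ∧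
     (∀ u : Nat, u < n → ((∃ i ∈ q, cell n i = u) ∨ (rd vis u = false ∧ rd (bfsLoopV g fuel q vis result).2 u = true)) →
        ∀ w ∈ g.getD u [], rd (bfsLoopV g fuel q vis result).2 (cell n w) = true)) := by
  intro fuel
  induction fuel with
  | zero =>
    intro q vis result hlen hm1 hq hfu
    simp only [bfsLoopV]
    refine ⟨hlen, by trivial, fun k hk => hk, fun k _ hk => Or.inl hk, ?_⟩
    intro u hu hcase w hw
    rcases hcase with ⟨i, hi, _⟩ | ⟨h1, h2⟩
    · have : q = [] := List.eq_nil_of_length_eq_zero (by omega)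
      subst this; simp at hi
    · rw [h1] at h2; cases h2
  | succ fuel ih =>
    intro q vis result hlen hm1 hq hfu
    match q with
    | [] =>
      simp only [bfsLoopV]
      refine ⟨hlen, by trivial, fun k hk => hk, fun k _ hk => Or.inl hk, ?_⟩
      intro u hu hcase w hw
      rcases hcase with ⟨i, hi, _⟩ | ⟨h1, h2⟩
      · simp at hi
      · rw [h1] at h2; cases h2
    | cur :: q' =>
      obtain ⟨hcOk, hcMk, hcRe⟩ := hq cur List.mem_cons_self
      have hrowEq : PySem.List.pyGetD g cur [] = g.getD (cell n cur) [] := by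
        rw [pyGetD_cell g [] (ok_inrG hcOk), ← ok_cell_eq hcOk]
      have hrowOk : RowOk n g.length vis1 (g.getD (cell n cur) []) := hR (cell n cur) hcRe
      have hq' : ∀ i ∈ q', Ok n g.length i ∧ rd vis (cell n i) = true ∧ reachF n g vis1 c0 (cell n i) :=
        fun j hj => hq j (List.mem_cons_of_mem _ hj)
      set F := (PySem.List.pyGetD g cur []).foldl stepA (result, q', vis) with hF
      have hunf : bfsLoopV g (fuel + 1) (cur :: q') vis result = bfsLoopV g fuel F.2.1 F.2.2 F.1 := rfl
      have hfold := foldA_spec n g vis1 (PySem.List.pyGetD g cur []) (hrowEq ▸ hrowOk) hn0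
        (result, q', vis) hlen hm1
      obtain ⟨L1, C1, M1, S1, Q1, Qs1, W1, E1, Me1⟩ := hfold
      have C1' : F.1 + (cfB F.2.2 : Int) = result + (cfB vis : Int) := C1
      have Me1' : F.2.1.length + cfB F.2.2 ≤ q'.length + cfB vis := Me1
      have hqF : ∀ i ∈ F.2.1, Ok n g.length i ∧ rd F.2.2 (cell n i) = true ∧ reachF n g vis1 c0 (cell n i) := by
        intro j hj
        rcases Q1 j hj with h | ⟨hjr, hjo, hjf, hjt⟩
        · obtain ⟨ho, hmk, hre⟩ := hq' j h
          exact ⟨ho, M1 _ hmk, hre⟩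
        · have hv1f : rd vis1 (cell n j) = false := by
            rcases hb : rd vis1 (cell n j) with _ | _
            · rfl
            · rw [hm1 _ hb] at hjf; cases hjf
          exact ⟨hjo, hjt, reach_step hcRe (hrowEq ▸ hjr) hjo hv1f⟩
      have hfuF : F.2.1.length + cfB F.2.2 ≤ fuel := by
        have : (cur :: q').length = q'.length + 1 := rfl
        omega
      obtain ⟨L2, C2, M2, S2, Cl2⟩ := ih F.2.1 F.2.2 F.1 L1 (mono_trans hm1 M1) hqF hfuF
      rw [hunf]
      refine ⟨L2, by omega, mono_trans M1 M2, ?_, ?_⟩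
      · intro k hk hkt
        rcases S2 k hk hkt with h | ⟨i, hiF, hiR⟩
        · rcases S1 k hk h with h' | ⟨j, hjr, hjc, hkf⟩
          · exact Or.inl h'
          · refine Or.inr ⟨cur, List.mem_cons_self, ?_⟩
            obtain ⟨_, hOkIf⟩ := hrowOk j (hrowEq ▸ hjr)
            have hv1f : rd vis1 k = false := by
              rcases hb : rd vis1 k with _ | _
              · rfl
              · rw [hm1 _ hb] at hkf; cases hkf
            have hOkj : Ok n g.length j := hOkIf (hjc ▸ hv1f)
            have := Rch.tail (n := n) (g := g) (vis := vis) (Rch.refl (cell n cur))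
              (hrowEq ▸ hjr) hOkj (hjc ▸ hkf)
            rwa [hjc] at this
        · have hiR' : Rch n g vis (cell n i) k := Rch_mono M1 hiR
          rcases Q1 i hiF with h | ⟨hir, hio, hif, _⟩
          · exact Or.inr ⟨i, List.mem_cons_of_mem _ h, hiR'⟩
          · refine Or.inr ⟨cur, List.mem_cons_self, ?_⟩
            have hstep : Rch n g vis (cell n cur) (cell n i) :=
              Rch.tail (Rch.refl (cell n cur)) (hrowEq ▸ hir) hio hif
            exact Rch_trans hstep hiR'
      · intro u hu hcase w hw
        rcases hcase with ⟨i, hi, hic⟩ | ⟨h1, h2⟩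
        · rcases List.mem_cons.mp hi with h' | h'
          · subst h'
            subst hic
            exact M2 _ (W1 w (hrowEq ▸ hw))
          · exact Cl2 u hu (Or.inl ⟨i, Qs1 _ h', hic⟩) w hw
        · by_cases hFu : rd F.2.2 u = true
          · obtain ⟨j, hjF, hjc⟩ := E1 u hu h1 hFu
            exact Cl2 u hu (Or.inl ⟨j, hjF, hjc⟩) w hw
          · have : rd F.2.2 u = false := by
              rcases hb : rd F.2.2 u with _ | _; rfl; exact absurd hb hFu
            exact Cl2 u hu (Or.inr ⟨this, h2⟩) w hw

-- ===== B-side: the recursive dfs =====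
def GoSpec (g : List (List Int)) (n : Nat) (vis1 : List Bool) (c0 : Nat) (fuel : Nat) : Prop :=
  ∀ (u : Int) (vis : List Bool), Ok n g.length u → vis.length = n →
    Mono vis1 (vis.set (cell n u) true) → reachF n g vis1 c0 (cell n u) →
    cfB (vis.set (cell n u) true) < fuel →
    ((dfsGo g fuel u vis).2.length = n ∧
     (dfsGo g fuel u vis).1 + ((cfB (dfsGo g fuel u vis).2 : Int)) = 1 + (cfB (vis.set (cell n u) true) : Int) ∧
     Mono vis (dfsGo g fuel u vis).2 ∧
     rd (dfsGo g fuel u vis).2 (cell n u) = true ∧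
     (∀ k : Nat, k < n → rd (dfsGo g fuel u vis).2 k = true → rd vis k = true ∨ Rch n g vis (cell n u) k) ∧
     (∀ w : Nat, w < n → (w = cell n u ∨ (rd vis w = false ∧ rd (dfsGo g fuel u vis).2 w = true)) →
        ∀ v ∈ g.getD w [], rd (dfsGo g fuel u vis).2 (cell n v) = true))

def RowSpec (g : List (List Int)) (n : Nat) (vis1 : List Bool) (c0 : Nat) (fuel : Nat) : Prop :=
  ∀ (row : List Int), RowOk n g.length vis1 row →
    (∀ j ∈ row, rd vis1 (cell n j) = false → reachF n g vis1 c0 (cell n j)) →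
    ∀ st : Int × List Bool, st.2.length = n → Mono vis1 st.2 → cfB st.2 ≤ fuel →
    ((dfsRow g fuel row st).2.length = n ∧
     (dfsRow g fuel row st).1 + ((cfB (dfsRow g fuel row st).2 : Int)) = st.1 + (cfB st.2 : Int) ∧
     Mono st.2 (dfsRow g fuel row st).2 ∧
     (∀ k : Nat, k < n → rd (dfsRow g fuel row st).2 k = true →
        rd st.2 k = true ∨ ∃ v ∈ row, rd st.2 (cell n v) = false ∧ Rch n g st.2 (cell n v) k) ∧
     (∀ w : Nat, w < n → rd st.2 w = false → rd (dfsRow g fuel row st).2 w = true →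
        ∀ v ∈ g.getD w [], rd (dfsRow g fuel row st).2 (cell n v) = true) ∧
     (∀ z ∈ row, rd (dfsRow g fuel row st).2 (cell n z) = true))

lemma rowSpec_of_go (g : List (List Int)) (n : Nat) (hn0 : 0 < n) (vis1 : List Bool) (c0 : Nat)
    (fuel : Nat) (hgo : GoSpec g n vis1 c0 fuel) : RowSpec g n vis1 c0 fuel := by
  intro row
  induction row with
  | nil =>
    intro _ _ st hlen _ hfu
    simp only [dfsRow]
    exact ⟨hlen, trivial, fun k hk => hk, fun k _ hk => Or.inl hk,
      fun w _ h1 h2 => absurd h2 (by rw [h1]; simp), by simp⟩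
  | cons v row' ih =>
    intro hrow hreach st hlen hm1 hfu
    obtain ⟨hInR, hOkIf⟩ := hrow v List.mem_cons_self
    have hrow' : RowOk n g.length vis1 row' := fun j hj => hrow j (List.mem_cons_of_mem _ hj)
    have hreach' : ∀ j ∈ row', rd vis1 (cell n j) = false → reachF n g vis1 c0 (cell n j) :=
      fun j hj => hreach j (List.mem_cons_of_mem _ hj)
    have hread : PySem.List.pyGetD st.2 v true = rd st.2 (cell n v) := by
      rw [pyGetD_cell st.2 true (by rw [hlen]; exact hInR), hlen]
    have hcvlt : cell n v < n := cell_lt hn0 v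
    have hcvlen : cell n v < st.2.length := by omega
    by_cases hc : rd st.2 (cell n v) = false
    · have hv1f : rd vis1 (cell n v) = false := by
        rcases hb : rd vis1 (cell n v) with _ | _
        · rfl
        · rw [hm1 _ hb] at hc; cases hc
      have hOk : Ok n g.length v := hOkIf hv1f
      have hunf : dfsRow g fuel (v :: row') st =
          dfsRow g fuel row' (st.1 + (dfsGo g fuel v st.2).1, (dfsGo g fuel v st.2).2) := by
        simp only [dfsRow, hread, hc]; rfl
      have hcm : cfB (st.2.set (cell n v) true) + 1 = cfB st.2 := cf_mark _ _ hcvlen hc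
      obtain ⟨rL, rC, rM, rU, rS, rCl⟩ := hgo v st.2 hOk hlen
        (mono_trans hm1 (mono_set _ _)) (hreach v List.mem_cons_self hv1f) (by omega)
      set r := dfsGo g fuel v st.2 with hr
      have hcfr : cfB r.2 ≤ cfB st.2 := cf_antitone st.2 r.2 (by omega) rM
      have hpair : cfB (st.1 + r.1, r.2).2 = cfB r.2 := rfl
      obtain ⟨L2, C2, M2, S2, Cl2, W2⟩ := ih hrow' hreach' (st.1 + r.1, r.2) rL
        (mono_trans hm1 rM) (by omega)
      rw [hunf]
      set out := dfsRow g fuel row' (st.1 + r.1, r.2) with hout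
      have C2' : out.1 + (cfB out.2 : Int) = st.1 + r.1 + (cfB r.2 : Int) := C2
      refine ⟨L2, by omega, mono_trans rM M2, ?_, ?_, ?_⟩
      · intro k hk hkt
        rcases S2 k hk hkt with h | ⟨v', hv', hvf, hvR⟩
        · rcases rS k hk h with h' | h'
          · exact Or.inl h'
          · exact Or.inr ⟨v, List.mem_cons_self, hc, h'⟩
        · have hvf' : rd st.2 (cell n v') = false := by
            rcases hb : rd st.2 (cell n v') with _ | _
            · rfl
            · rw [rM _ hb] at hvf; cases hvf
          exact Or.inr ⟨v', List.mem_cons_of_mem _ hv', hvf', Rch_mono rM hvR⟩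
      · intro w hw hwf hwt z hz
        by_cases hrw : rd r.2 w = true
        · exact M2 _ (rCl w hw (Or.inr ⟨hwf, hrw⟩) z hz)
        · have : rd r.2 w = false := by
            rcases hb : rd r.2 w with _ | _; rfl; exact absurd hb hrw
          exact Cl2 w hw this hwt z hz
      · intro z hz
        rcases List.mem_cons.mp hz with h | h
        · subst h; exact M2 _ rU
        · exact W2 z h
    · have hc' : rd st.2 (cell n v) = true := by
        rcases hb : rd st.2 (cell n v) with _ | _
        · exact absurd hb hc
        · rfl
      have hunf : dfsRow g fuel (v :: row') st = dfsRow g fuel row' st := by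
        simp only [dfsRow]
        rw [hread, hc']
        simp
      rw [hunf]
      obtain ⟨L2, C2, M2, S2, Cl2, W2⟩ := ih hrow' hreach' st hlen hm1 hfu
      refine ⟨L2, C2, M2, ?_, Cl2, ?_⟩
      · intro k hk hkt
        rcases S2 k hk hkt with h | ⟨v', hv', hvf, hvR⟩
        · exact Or.inl h
        · exact Or.inr ⟨v', List.mem_cons_of_mem _ hv', hvf, hvR⟩
      · intro z hz
        rcases List.mem_cons.mp hz with h | h
        · subst h; exact M2 _ hc'
        · exact W2 z h

lemma go_of_row (g : List (List Int)) (n : Nat) (hn0 : 0 < n) (vis1 : List Bool) (c0 : Nat)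
    (hR : ∀ p : Nat, reachF n g vis1 c0 p → RowOk n g.length vis1 (g.getD p []))
    (fuel : Nat) (hrow : RowSpec g n vis1 c0 fuel) : GoSpec g n vis1 c0 (fuel + 1) := by
  intro u vis hOk hlen hm1 hre hfu
  have hset : PySem.List.pySetD vis u true = vis.set (cell n u) true := by
    rw [pySetD_cell vis true (by rw [hlen]; exact ok_inrV hOk), hlen]
  have hrowEq : PySem.List.pyGetD g u [] = g.getD (cell n u) [] := by
    rw [pyGetD_cell g [] (ok_inrG hOk), ← ok_cell_eq hOk]
  have hunf : dfsGo g (fuel + 1) u vis =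
      dfsRow g fuel (g.getD (cell n u) []) (1, vis.set (cell n u) true) := by
    simp only [dfsGo, hset, hrowEq]
  have hculen : cell n u < vis.length := by rw [hlen]; exact cell_lt hn0 u
  have hrdset : ∀ m : Nat, rd (vis.set (cell n u) true) m = if m = cell n u then true else rd vis m :=
    fun m => rd_set _ _ _ hculen
  have hrowOk : RowOk n g.length vis1 (g.getD (cell n u) []) := hR (cell n u) hre
  have hreachRow : ∀ j ∈ g.getD (cell n u) [], rd vis1 (cell n j) = false →
      reachF n g vis1 c0 (cell n j) := by
    intro j hj hjf
    obtain ⟨_, hOkIf⟩ := hrowOk j hj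
    exact reach_step hre hj (hOkIf hjf) hjf
  have hpair : cfB (1, vis.set (cell n u) true).2 = cfB (vis.set (cell n u) true) := rfl
  obtain ⟨L, C, M, S, Cl, W⟩ := hrow (g.getD (cell n u) []) hrowOk hreachRow
    (1, vis.set (cell n u) true) (by simp [hlen]) hm1 (by omega)
  rw [hunf]
  set out := dfsRow g fuel (g.getD (cell n u) []) (1, vis.set (cell n u) true) with hout
  have C' : out.1 + (cfB out.2 : Int) = 1 + (cfB (vis.set (cell n u) true) : Int) := C
  have M' : Mono (vis.set (cell n u) true) out.2 := M
  refine ⟨L, C', mono_trans (mono_set _ _) M', M' (cell n u) (by rw [hrdset]; simp), ?_, ?_⟩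
  · intro k hk hkt
    rcases S k hk hkt with h | ⟨v, hv, hvf, hvR⟩
    · rw [hrdset k] at h
      split at h
      · subst k; exact Or.inr (Rch.refl (cell n u))
      · exact Or.inl h
    · obtain ⟨_, hOkIf⟩ := hrowOk v hv
      have hvf' : rd vis (cell n v) = false := by
        rcases hb : rd vis (cell n v) with _ | _
        · rfl
        · rw [mono_set vis (cell n u) _ hb] at hvf; cases hvf
      have hv1f : rd vis1 (cell n v) = false := by
        rcases hb : rd vis1 (cell n v) with _ | _
        · rfl
        · have := hm1 _ hb
          rw [this] at hvf; cases hvf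
      have hstep : Rch n g vis (cell n u) (cell n v) :=
        Rch.tail (Rch.refl (cell n u)) hv (hOkIf hv1f) hvf'
      exact Or.inr (Rch_trans hstep (Rch_mono (mono_set _ _) hvR))
  · intro w hw hcase z hz
    rcases hcase with h | ⟨h1, h2⟩
    · subst h; exact W z hz
    · by_cases hsw : rd (vis.set (cell n u) true) w = true
      · rw [hrdset w] at hsw
        split at hsw
        · subst w; exact W z hz
        · rw [h1] at hsw; cases hsw
      · have : rd (vis.set (cell n u) true) w = false := by
          rcases hb : rd (vis.set (cell n u) true) w with _ | _; rfl; exact absurd hb hsw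
        exact Cl w hw this h2 z hz

lemma goSpec_all (g : List (List Int)) (n : Nat) (hn0 : 0 < n) (vis1 : List Bool) (c0 : Nat)
    (hR : ∀ p : Nat, reachF n g vis1 c0 p → RowOk n g.length vis1 (g.getD p [])) :
    ∀ fuel, GoSpec g n vis1 c0 fuel := by
  intro fuel
  induction fuel with
  | zero => intro u vis _ _ _ _ hfu; omega
  | succ fuel ih =>
    exact go_of_row g n hn0 vis1 c0 hR fuel (rowSpec_of_go g n hn0 vis1 c0 fuel ih)

-- ===== main equivalence =====
theorem the_main : ∀ (x : Int) (visited : List Bool) (graph : List (List Int)),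
    Pre_bfs x visited graph → bfs x visited graph = bfs_alt x visited graph := by
  intro x visited graph ⟨hOkx, hProws⟩
  set n := visited.length with hn
  have hn0 : 0 < n := ok_pos hOkx
  set c0 := cell n x with hc0def
  have hc0 : c0 < n := cell_lt hn0 x
  set vis1 := visited.set c0 true with hvis1
  have hlen1 : vis1.length = n := by simp [hvis1, hn]
  have hrdset : ∀ m : Nat, rd vis1 m = if m = c0 then true else rd visited m :=
    fun m => rd_set _ _ _ (by omega)
  have hcf1 : cfB vis1 ≤ n := le_trans (cf_set_le _ _) (by rw [hn]; exact cf_le_len _)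
  have hcf1' : cfB (visited.set (cell n x) true) ≤ n := hcf1
  have hR : ∀ p : Nat, reachF n graph vis1 c0 p → RowOk n graph.length vis1 (graph.getD p []) := by
    intro p hp
    have hpn : p < n := reachF_lt hc0 hp
    have hmk := marks_complete n graph vis1 c0 hc0 hp
    exact hProws p (List.mem_range.mpr hpn) hmk
  -- A side
  have hset : PySem.List.pySetD visited x true = vis1 := by
    rw [pySetD_cell visited true (ok_inrV hOkx)]
  have hA : bfs x visited graph = (bfsLoopV graph (n + 1) [x] vis1 1).1 := by
    rw [bfs, hset, bfsLoop_eq_V]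
  obtain ⟨LA, CA, MA, SA, ClA⟩ := bfsV_spec graph n hn0 vis1 c0 hc0 hR (n + 1) [x] vis1 1 hlen1
    (fun k hk => hk)
    (by
      intro i hi
      simp at hi
      subst hi
      have hcc : cell n i = c0 := rfl
      exact ⟨hOkx, by rw [hrdset, if_pos hcc], Or.inl rfl⟩)
    (by simp only [List.length_cons, List.length_nil]; omega)
  set outA := bfsLoopV graph (n + 1) [x] vis1 1 with houtA
  -- B side
  obtain ⟨LB, CB, MB, UB, SB, ClB⟩ := goSpec_all graph n hn0 vis1 c0 hR (n + 1) x visited hOkx rfl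
    (fun k hk => hk) (Or.inl rfl) (by omega)
  set outB := dfsGo graph (n + 1) x visited with houtB
  have CB' : outB.1 + (cfB outB.2 : Int) = 1 + (cfB vis1 : Int) := CB
  have LB' : outB.2.length = n := LB
  -- pin both final visited arrays
  have pinA := pin c0 hc0 vis1 outA.2 MA
    (MA c0 (by rw [hrdset]; simp))
    (fun k hk hkt => by
      rcases SA k hk hkt with h | ⟨i, hi, hR'⟩
      · exact Or.inl h
      · simp at hi; subst hi; exact Or.inr hR')
    (fun w hw hcase v hv => by
      refine ClA w hw ?_ v hv
      rcases hcase with h | h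
      · exact Or.inl ⟨x, List.mem_cons_self, h.symm⟩
      · exact Or.inr h)
  have hmono1B : Mono vis1 outB.2 := by
    intro k hk
    rw [hrdset k] at hk
    split at hk
    · subst k; exact UB
    · exact MB k hk
  have pinB := pin c0 hc0 vis1 outB.2 hmono1B UB
    (fun k hk hkt => by
      rcases SB k hk hkt with h | h
      · exact Or.inl (mono_set visited c0 k h)
      · rcases Rch01 (by omega) h with h' | h'
        · exact Or.inl h'
        · exact Or.inr h')
    (fun w hw hcase v hv => by
      refine ClB w hw ?_ v hv
      rcases hcase with h | ⟨h1, h2⟩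
      · exact Or.inl h
      · refine Or.inr ⟨?_, h2⟩
        rcases hb : rd visited w with _ | _
        · rfl
        · rw [mono_set visited c0 w hb] at h1
          cases h1)
  -- the two final visited arrays agree
  have hvisEq : outA.2 = outB.2 := by
    apply List.ext_getElem (by omega)
    intro k h1 h2
    have hk : k < n := by omega
    have e1 : rd outA.2 k = outA.2[k] := by rw [rd, List.getD_eq_getElem _ _ h1]
    have e2 : rd outB.2 k = outB.2[k] := by rw [rd, List.getD_eq_getElem _ _ h2]
    have := (pinA k hk).trans (pinB k hk).symm
    rw [e1, e2] at this
    rcases hb : outB.2[k] with _ | _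
    · rcases ha : outA.2[k] with _ | _
      · rfl
      · rw [ha, hb] at this; simpa using this.mp rfl
    · rcases ha : outA.2[k] with _ | _
      · rw [ha, hb] at this; simpa using this.mpr rfl
      · rfl
  have hcfEq : cfB outA.2 = cfB outB.2 := by rw [hvisEq]
  have : outA.1 = outB.1 := by omega
  rw [hA]
  exact this

-- ===== VERDICT (by name: the statement is the Claim_ definition above) =====
theorem bfs_spec : Claim_equal_bfs := by
  intro x visited graph _ hpre
  exact the_main x visited graph hpre
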